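-- pv_equiv track=rewrite | github.com/arnesandrib/Galois-Ring-APN-Classification | utils_sage.py | base_m_xor_numba
-- ===== SOURCE A (Python) =====
-- def base_m_xor_numba(a, b, base):
--     result = 0
--     place = 1
--     while a > 0 or b > 0:
--         result += ((a % base + b % base) % base) * place
--         a //= base
--         b //= base
--         place *= base
--     return result
-- ===== SOURCE B (Python) =====
-- def _ndigits(x, base):
--     c = 0
--     while x > 0:
--         x //= base
--         c += 1
--     return c
--
--
-- def _digits(x, base, n):
--     ds = []
--     for _ in range(n):
--         ds.append(x % base)
--         x //= base
--     return ds
--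
--
-- def base_m_xor_numba(a, b, base):
--     n = max(_ndigits(a, base), _ndigits(b, base))
--     da = _digits(a, base, n)
--     db = _digits(b, base, n)
--     total = 0
--     for x, y in zip(reversed(da), reversed(db)):
--         total = total * base + (x + y) % base
--     return total
-- ===== Notes on version B (the rewrite author's own statement) =====
-- stated objective: alternative
-- what changed: A's single interleaved loop (carry-free digit add with a running place value) is replaced by two separate digit-extraction passes into lists followed by a Horner-style most-significant-first recombination pass.
-- outside the precondition, e.g. on base_m_xor_numba(-9, 1, -2): A returns 2, B returns 0; on base_m_xor_numba(5, 3, 0): A raises ZeroDivisionError, B raises ZeroDivisionError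
import Mathlib
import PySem

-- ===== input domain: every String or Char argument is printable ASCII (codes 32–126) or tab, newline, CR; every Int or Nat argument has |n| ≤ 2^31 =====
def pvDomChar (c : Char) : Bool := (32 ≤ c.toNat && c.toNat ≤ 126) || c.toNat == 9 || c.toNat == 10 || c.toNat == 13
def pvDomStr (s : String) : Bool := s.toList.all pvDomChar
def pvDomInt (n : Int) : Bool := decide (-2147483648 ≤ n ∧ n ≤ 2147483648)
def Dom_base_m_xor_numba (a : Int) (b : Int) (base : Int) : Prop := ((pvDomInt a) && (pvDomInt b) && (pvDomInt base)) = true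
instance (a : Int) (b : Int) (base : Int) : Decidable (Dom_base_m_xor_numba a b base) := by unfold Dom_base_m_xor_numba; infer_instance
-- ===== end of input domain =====

-- B replaces A's interleaved digit loop by two digit-extraction passes plus a Horner recombination pass (objective: alternative decomposition, same cost).

-- ===== PORT A =====
-- the while loop of A; 64 fuel suffices for every input admitted by Dom ∧ Pre (at most 32 iterations for base ≥ 2, |a|,|b| ≤ 2^31)
def pvALoop : Nat → Int → Int → Int → Int → Int → Int
  | 0, _, _, _, result, _ => result
  | fuel+1, a, b, base, result, place =>
    if a > 0 ∨ b > 0 then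
      pvALoop fuel (PySem.Int.floordiv a base) (PySem.Int.floordiv b base) base
        (result + (PySem.Int.mod (PySem.Int.mod a base + PySem.Int.mod b base) base) * place)
        (place * base)
    else result

def base_m_xor_numba (a : Int) (b : Int) (base : Int) : Int :=
  pvALoop 64 a b base 0 1

-- ===== PORT B =====
-- _ndigits: count the base-`base` digits of x (while x > 0); same fuel bound as A's loop
def pvNdigits : Nat → Int → Int → Nat
  | 0, _, _ => 0
  | fuel+1, x, base => if x > 0 then pvNdigits fuel (PySem.Int.floordiv x base) base + 1 else 0

-- _digits: the first n floored-division digits of x, little-endian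
def pvDigits : Int → Int → Nat → List Int
  | _, _, 0 => []
  | x, base, n+1 => PySem.Int.mod x base :: pvDigits (PySem.Int.floordiv x base) base n

def base_m_xor_numba_alt (a : Int) (b : Int) (base : Int) : Int :=
  let n := max (pvNdigits 64 a base) (pvNdigits 64 b base)
  let da := pvDigits a base n
  let db := pvDigits b base n
  (da.reverse.zip db.reverse).foldl (fun t p => t * base + PySem.Int.mod (p.1 + p.2) base) 0

-- ===== PRECONDITION & SPEC =====
-- Pre_ excludes base ≤ 1 with a positive argument (A raises ZeroDivisionError at base 0 and never terminates at base 1)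
-- and also base ≤ -2 with a positive argument, where A still returns: there its floored-division "digit" sequence can
-- re-enter positivity and the value is an artefact of the loop condition, outside the function's base-m digit purpose.
def Pre_base_m_xor_numba (a : Int) (b : Int) (base : Int) : Prop :=
  2 ≤ base ∨ (a ≤ 0 ∧ b ≤ 0)
instance (a : Int) (b : Int) (base : Int) : Decidable (Pre_base_m_xor_numba a b base) := by
  unfold Pre_base_m_xor_numba; infer_instance

def pvWitness_base_m_xor_numba : Int × Int × Int := (5, 3, 2)

def Spec_base_m_xor_numba (a : Int) (b : Int) (base : Int) (out : Int) : Prop := out = base_m_xor_numba_alt a b base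
instance (a : Int) (b : Int) (base : Int) (out : Int) : Decidable (Spec_base_m_xor_numba a b base out) := by unfold Spec_base_m_xor_numba; infer_instance

-- ===== CLAIM (what is proved, stated in full; the proofs are below) =====
def Claim_equal_base_m_xor_numba : Prop := ∀ (a : Int) (b : Int) (base : Int), Dom_base_m_xor_numba a b base → Pre_base_m_xor_numba a b base → Spec_base_m_xor_numba a b base (base_m_xor_numba a b base)

-- ===== LEMMAS AND PROOFS =====

-- common recursive value of the digit-wise sum, used to relate the two ports
def pvVal : Nat → Int → Int → Int → Int
  | 0, _, _, _ => 0
  | fuel+1, a, b, base =>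
    if a > 0 ∨ b > 0 then
      PySem.Int.mod (PySem.Int.mod a base + PySem.Int.mod b base) base
        + base * pvVal fuel (PySem.Int.floordiv a base) (PySem.Int.floordiv b base) base
    else 0

theorem pvALoop_eq_val (fuel : Nat) : ∀ (a b base r p : Int),
    pvALoop fuel a b base r p = r + p * pvVal fuel a b base := by
  induction fuel with
  | zero => intro a b base r p; simp [pvALoop, pvVal]
  | succ f ih =>
    intro a b base r p
    by_cases h : a > 0 ∨ b > 0
    · simp only [pvALoop, pvVal, if_pos h, ih]; ring
    · simp [pvALoop, pvVal, h]

theorem floordiv_nonpos_of_nonpos {x base : Int} (hb : 2 ≤ base) (hx : x ≤ 0) :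
    PySem.Int.floordiv x base ≤ 0 := by
  rw [PySem.Int.floordiv_eq_ediv_of_pos (by omega)]
  have h := Int.ediv_le_ediv (c := base) (by omega) hx
  simpa using h

theorem pvNdigits_nonpos (fuel : Nat) (x base : Int) (hx : x ≤ 0) :
    pvNdigits fuel x base = 0 := by
  cases fuel with
  | zero => rfl
  | succ f => simp [pvNdigits, show ¬ x > 0 by omega]

theorem pvDigits_length (x base : Int) (n : Nat) : (pvDigits x base n).length = n := by
  induction n generalizing x with
  | zero => rfl
  | succ m ih => simp [pvDigits, ih]

theorem pvHorner_eq_val (fuel : Nat) {base : Int} (hb : 2 ≤ base) : ∀ (a b : Int),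
    ((pvDigits a base (max (pvNdigits fuel a base) (pvNdigits fuel b base))).reverse.zip
      (pvDigits b base (max (pvNdigits fuel a base) (pvNdigits fuel b base))).reverse).foldl
      (fun t p => t * base + PySem.Int.mod (p.1 + p.2) base) 0
      = pvVal fuel a b base := by
  induction fuel with
  | zero => intro a b; simp [pvNdigits, pvDigits, pvVal]
  | succ f ih =>
    intro a b
    by_cases h : a > 0 ∨ b > 0
    · have hna : pvNdigits (f+1) a base
          = pvNdigits f (PySem.Int.floordiv a base) base + (if a > 0 then 1 else 0) := by
        by_cases ha : a > 0
        · simp [pvNdigits, ha]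
        · have ha' : a ≤ 0 := by omega
          simp [pvNdigits, ha,
            pvNdigits_nonpos f _ base (floordiv_nonpos_of_nonpos hb ha')]
      have hnb : pvNdigits (f+1) b base
          = pvNdigits f (PySem.Int.floordiv b base) base + (if b > 0 then 1 else 0) := by
        by_cases hb' : b > 0
        · simp [pvNdigits, hb']
        · have hb'' : b ≤ 0 := by omega
          simp [pvNdigits, hb',
            pvNdigits_nonpos f _ base (floordiv_nonpos_of_nonpos hb hb'')]
      set a' := PySem.Int.floordiv a base with ha'def
      set b' := PySem.Int.floordiv b base with hb'def
      have hn : max (pvNdigits (f+1) a base) (pvNdigits (f+1) b base)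
          = max (pvNdigits f a' base) (pvNdigits f b' base) + 1 := by
        by_cases ha2 : a > 0 <;> by_cases hb2 : b > 0
        · rw [hna, hnb, if_pos ha2, if_pos hb2]; omega
        · have hz : pvNdigits f b' base = 0 :=
            pvNdigits_nonpos f _ base (floordiv_nonpos_of_nonpos hb (by omega))
          rw [hna, hnb, if_pos ha2, if_neg hb2, hz]; omega
        · have hz : pvNdigits f a' base = 0 :=
            pvNdigits_nonpos f _ base (floordiv_nonpos_of_nonpos hb (by omega))
          rw [hna, hnb, if_neg ha2, if_pos hb2, hz]; omega
        · exact absurd h (by omega)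
      rw [hn]
      simp only [pvDigits, List.reverse_cons]
      rw [List.zip_append (by simp [pvDigits_length]), List.foldl_append]
      simp only [List.zip_cons_cons, List.zip_nil_right, List.foldl_cons, List.foldl_nil]
      rw [ih a' b']
      simp only [pvVal, if_pos h]
      ring
    · push Not at h
      have h0 : max (pvNdigits (f+1) a base) (pvNdigits (f+1) b base) = 0 := by
        simp [pvNdigits_nonpos _ _ _ h.1, pvNdigits_nonpos _ _ _ h.2]
      rw [h0]
      simp [pvDigits, pvVal, show ¬(a > 0 ∨ b > 0) by omega]

-- ===== VERDICT (by name: the statement is the Claim_ definition above) =====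
theorem base_m_xor_numba_spec : Claim_equal_base_m_xor_numba := by
  intro a b base _ hpre
  unfold Spec_base_m_xor_numba base_m_xor_numba base_m_xor_numba_alt
  rcases hpre with hb | ⟨ha, hbn⟩
  · rw [pvALoop_eq_val, pvHorner_eq_val 64 hb a b]; ring
  · have hcond : ¬ (a > 0 ∨ b > 0) := by omega
    rw [pvNdigits_nonpos _ _ _ ha, pvNdigits_nonpos _ _ _ hbn]
    simp [pvALoop, pvDigits, hcond]
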